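-- pv_equiv track=rewrite | github.com/UPGo-McGill/mtl_landlords | scraper/captcha_solver/captcha_solver.py | make_patterns
-- ===== SOURCE A (Python) =====
-- from itertools import product
--
-- def make_patterns(seq, keyletters = ["I", "J"]):
--     permutations = []
--     indices = [i for i, c in enumerate(seq) if c in keyletters]
--     for t in product(keyletters, repeat=len(indices)):
--         for i, c in zip(indices, t):
--             seq[i] = c
--         permutations.append(''.join(seq))
--     return permutations
-- ===== SOURCE B (Python) =====
-- def make_patterns(seq, keyletters = ["I", "J"]):
--     patterns = [""]
--     for c in seq:
--         if c in keyletters: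
--             patterns = [p + k for p in patterns for k in keyletters]
--         else:
--             patterns = [p + c for p in patterns]
--     return patterns
-- ===== Notes on version B (the rewrite author's own statement) =====
-- stated objective: alternative
-- what changed: Instead of collecting the marked indices and enumerating itertools.product tuples that are written back into seq before each join, B makes a single left-to-right pass over seq, growing the list of all pattern prefixes: a marked element multiplies the prefixes by every keyletter, an unmarked element is appended to every prefix; B does not mutate seq (A does), the return value is identical.
import Mathlib
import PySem

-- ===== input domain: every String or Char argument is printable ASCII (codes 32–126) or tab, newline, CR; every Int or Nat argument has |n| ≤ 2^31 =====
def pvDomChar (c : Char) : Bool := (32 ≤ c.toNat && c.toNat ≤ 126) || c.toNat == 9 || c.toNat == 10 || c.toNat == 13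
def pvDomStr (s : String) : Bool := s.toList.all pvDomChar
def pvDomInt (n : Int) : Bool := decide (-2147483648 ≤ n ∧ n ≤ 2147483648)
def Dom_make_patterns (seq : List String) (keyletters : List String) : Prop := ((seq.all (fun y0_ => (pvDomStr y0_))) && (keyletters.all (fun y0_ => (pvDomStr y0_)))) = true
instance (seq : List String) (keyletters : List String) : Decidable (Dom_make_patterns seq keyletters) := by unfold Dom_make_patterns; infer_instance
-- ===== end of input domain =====

-- B replaces the index-list + itertools.product enumeration by a single left-to-right pass that
-- grows all pattern prefixes simultaneously (alternative decomposition, same cost).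
-- A mutates `seq` in place and B does not: the equivalence proved here is about the RETURN value only.

-- ===== PORT A =====
-- itertools.product(ks, repeat=n), leftmost component varying slowest (CPython's order).
def pyProductRep (ks : List String) : Nat → List (List String)
  | 0 => [[]]
  | n + 1 => ks.flatMap (fun c => (pyProductRep ks n).map (fun t => c :: t))

-- A's inner loop 'for i, c in zip(indices, t): seq[i] = c' (each i is a valid 0-based position,
-- so the assignment is exactly List.set).
def pvAssign (s : List String) (idx : List Nat) (t : List String) : List String :=
  (idx.zip t).foldl (fun s p => s.set p.1 p.2) s

-- Literal port of A. enumerate indices are the nonnegative positions 0..len-1, kept as Nat via zipIdx.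
def make_patterns (seq : List String) (keyletters : List String) : List String :=
  let indices := ((seq.zipIdx).filter (fun p => keyletters.contains p.1)).map (fun p => p.2)
  (((pyProductRep keyletters indices.length).foldl
      (fun (st : List String × List String) t =>
        let s := pvAssign st.1 indices t
        (s, st.2 ++ [PySem.Str.join "" s]))
      (seq, []))).2

-- ===== PORT B =====
-- Literal port of Source B: one pass over seq; at a marked element every prefix is extended by every
-- keyletter, at an unmarked element every prefix is extended by that element.
def make_patterns_alt (seq : List String) (keyletters : List String) : List String :=
  seq.foldl
    (fun patterns c =>
      if keyletters.contains c then
        patterns.flatMap (fun p => keyletters.map (fun k => p ++ k))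
      else
        patterns.map (fun p => p ++ c))
    [""]

-- ===== PRECONDITION & SPEC =====
def Spec_make_patterns (seq : List String) (keyletters : List String) (out : List String) : Prop := out = make_patterns_alt seq keyletters
instance (seq : List String) (keyletters : List String) (out : List String) : Decidable (Spec_make_patterns seq keyletters out) := by unfold Spec_make_patterns; infer_instance

-- ===== CLAIM (what is proved, stated in full; the proofs are below) =====
def Claim_equal_make_patterns : Prop := ∀ (seq : List String) (keyletters : List String), Dom_make_patterns seq keyletters → Spec_make_patterns seq keyletters (make_patterns seq keyletters)

-- ===== LEMMAS AND PROOFS =====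

-- the marked positions of seq, computed recursively
def pvIdx (ks : List String) : List String → List Nat
  | [] => []
  | c :: rest => if ks.contains c then 0 :: (pvIdx ks rest).map (· + 1) else (pvIdx ks rest).map (· + 1)

theorem pvJoin_nil : PySem.Str.join "" ([] : List String) = "" := by
  simp [PySem.Str.join, PySem.Chars.join, List.intercalate]

theorem pvJoin_cons (x : String) (l : List String) :
    PySem.Str.join "" (x :: l) = x ++ PySem.Str.join "" l := by
  cases l with
  | nil => simp [PySem.Str.join, PySem.Chars.join, List.intercalate]
  | cons y l => simp [PySem.Str.join, PySem.Chars.join_cons_cons]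

theorem pvIdx_eq (ks : List String) (seq : List String) :
    ((seq.zipIdx).filter (fun p => ks.contains p.1)).map (fun p => p.2) = pvIdx ks seq := by
  induction seq with
  | nil => simp [pvIdx]
  | cons c rest ih =>
      rw [List.zipIdx_cons, List.zipIdx_succ, pvIdx]
      by_cases h : c ∈ ks <;>
        simp [h, List.filter_map, List.map_map, Function.comp_def, ← ih]

theorem pvIdx_nodup (ks : List String) (seq : List String) : (pvIdx ks seq).Nodup := by
  induction seq with
  | nil => simp [pvIdx]
  | cons c rest ih =>
      rw [pvIdx]
      have hm : ((pvIdx ks rest).map (· + 1)).Nodup :=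
        ih.map (fun a b h => by omega)
      by_cases h : ks.contains c = true
      · rw [if_pos h, List.nodup_cons]
        refine ⟨?_, hm⟩
        intro hmem
        rcases List.mem_map.mp hmem with ⟨a, _, ha⟩
        omega
      · rw [if_neg h]
        exact hm

theorem pvProductRep_length (ks : List String) (n : Nat) :
    ∀ t ∈ pyProductRep ks n, t.length = n := by
  induction n with
  | zero => intro t ht; simp [pyProductRep] at ht; simp [ht]
  | succ n ih =>
      intro t ht
      simp only [pyProductRep, List.mem_flatMap, List.mem_map] at ht
      rcases ht with ⟨c, _, t', ht', rfl⟩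
      simp [ih t' ht']

theorem pvAssign_shift (x : String) (l : List String) (idx : List Nat) (t : List String) :
    pvAssign (x :: l) (idx.map (· + 1)) t = x :: pvAssign l idx t := by
  induction idx generalizing t l x with
  | nil => simp [pvAssign]
  | cons i idx ih =>
      cases t with
      | nil => simp [pvAssign]
      | cons a t =>
          show pvAssign ((x :: l).set (i + 1) a) (idx.map (· + 1)) t
              = x :: pvAssign (l.set i a) idx t
          rw [List.set_cons_succ]
          exact ih x (l.set i a) t

theorem pvAssign_set_comm (i : Nat) (a : String) (idx : List Nat) (t : List String)
    (s : List String) (h : i ∉ idx) :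
    pvAssign (s.set i a) idx t = (pvAssign s idx t).set i a := by
  induction idx generalizing t s with
  | nil => simp [pvAssign]
  | cons j idx ih =>
      cases t with
      | nil => simp [pvAssign]
      | cons b t =>
          have hij : i ≠ j := fun he => h (he ▸ List.mem_cons_self)
          show pvAssign ((s.set i a).set j b) idx t = (pvAssign (s.set j b) idx t).set i a
          rw [List.set_comm a b hij]
          exact ih t (s.set j b) (fun hm => h (List.mem_cons_of_mem _ hm))

theorem pvAssign_assign (idx : List Nat) (hnd : idx.Nodup) (t t' : List String)
    (ht : t.length = idx.length) (ht' : t'.length = idx.length) (s : List String) :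
    pvAssign (pvAssign s idx t') idx t = pvAssign s idx t := by
  induction idx generalizing t t' s with
  | nil => simp [pvAssign]
  | cons i idx ih =>
      rcases List.nodup_cons.mp hnd with ⟨hi, hnd'⟩
      cases t with
      | nil => simp at ht
      | cons a t =>
          cases t' with
          | nil => simp at ht'
          | cons a' t' =>
              show pvAssign ((pvAssign (s.set i a') idx t').set i a) idx t
                  = pvAssign (s.set i a) idx t
              rw [pvAssign_set_comm i a' idx t' s hi, List.set_set,
                ← pvAssign_set_comm i a idx t' s hi]
              exact ih hnd' t t' (by simpa using ht) (by simpa using ht') (s.set i a)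

theorem pvA_loop (idx : List Nat) (hnd : idx.Nodup) (seq : List String)
    (L : List (List String)) (hL : ∀ t ∈ L, t.length = idx.length)
    (s : List String) (acc : List String)
    (hs : ∀ t, t.length = idx.length → pvAssign s idx t = pvAssign seq idx t) :
    (L.foldl (fun (st : List String × List String) t =>
        let s := pvAssign st.1 idx t
        (s, st.2 ++ [PySem.Str.join "" s])) (s, acc)).2
      = acc ++ L.map (fun t => PySem.Str.join "" (pvAssign seq idx t)) := by
  induction L generalizing s acc with
  | nil => simp
  | cons t L ih =>
      have hlt : t.length = idx.length := hL t List.mem_cons_self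
      have h1 : pvAssign s idx t = pvAssign seq idx t := hs t hlt
      simp only [List.foldl_cons, List.map_cons]
      rw [ih (fun u hu => hL u (List.mem_cons_of_mem _ hu)) (pvAssign s idx t)
        (acc ++ [PySem.Str.join "" (pvAssign s idx t)])
        (fun u hu => by
          rw [h1]
          exact pvAssign_assign idx hnd u t hu hlt seq)]
      simp [h1]

theorem pvB_main (ks : List String) (seq : List String) (P : List String) :
    seq.foldl
      (fun patterns c =>
        if ks.contains c then
          patterns.flatMap (fun p => ks.map (fun k => p ++ k))
        else
          patterns.map (fun p => p ++ c)) P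
    = P.flatMap (fun p => (pyProductRep ks (pvIdx ks seq).length).map
        (fun t => p ++ PySem.Str.join "" (pvAssign seq (pvIdx ks seq) t))) := by
  induction seq generalizing P with
  | nil =>
      simp [pvIdx, pyProductRep, pvAssign, pvJoin_nil]
  | cons c rest ih =>
      rw [List.foldl_cons, ih, pvIdx]
      by_cases h : ks.contains c = true
      · rw [if_pos h, if_pos h]
        simp only [List.length_cons, pyProductRep, List.length_map]
        rw [List.flatMap_assoc]
        refine List.flatMap_congr (fun p _ => ?_)
        rw [List.map_flatMap, List.flatMap_map]
        refine List.flatMap_congr (fun k _ => ?_)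
        rw [List.map_map]
        refine List.map_congr_left (fun t _ => ?_)
        show (p ++ k) ++ PySem.Str.join "" (pvAssign rest (pvIdx ks rest) t)
            = p ++ PySem.Str.join "" (pvAssign (c :: rest) (0 :: (pvIdx ks rest).map (· + 1)) (k :: t))
        have hA : pvAssign (c :: rest) (0 :: (pvIdx ks rest).map (· + 1)) (k :: t)
            = k :: pvAssign rest (pvIdx ks rest) t := by
          show pvAssign ((c :: rest).set 0 k) ((pvIdx ks rest).map (· + 1)) t = _
          rw [List.set_cons_zero, pvAssign_shift]
        rw [hA, pvJoin_cons, String.append_assoc]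
      · rw [if_neg h, if_neg h]
        simp only [List.length_map]
        rw [List.flatMap_map]
        refine List.flatMap_congr (fun p _ => ?_)
        refine List.map_congr_left (fun t _ => ?_)
        show (p ++ c) ++ PySem.Str.join "" (pvAssign rest (pvIdx ks rest) t)
            = p ++ PySem.Str.join "" (pvAssign (c :: rest) ((pvIdx ks rest).map (· + 1)) t)
        rw [pvAssign_shift, pvJoin_cons, String.append_assoc]

-- ===== VERDICT (by name: the statement is the Claim_ definition above) =====
theorem make_patterns_spec : Claim_equal_make_patterns := by
  intro seq ks _
  unfold Spec_make_patterns make_patterns make_patterns_alt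
  dsimp only
  rw [pvIdx_eq]
  rw [pvA_loop (pvIdx ks seq) (pvIdx_nodup ks seq) seq
    (pyProductRep ks (pvIdx ks seq).length)
    (pvProductRep_length ks (pvIdx ks seq).length) seq [] (fun _ _ => rfl)]
  rw [pvB_main ks seq [""]]
  simp
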